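-- pv_equiv track=rewrite | github.com/iamkroot/bill-split | bill_split.py | resolve_aliases
-- ===== SOURCE A (Python) =====
-- def resolve_aliases(aliases: dict[str, set[str]]):
--     """Expand all aliases recursively till they only contain names.
--     Plms don't give cyclic.
--     """
--     if all(all('@' not in name for name in v) for v in aliases.values()):
--         # Done!
--         return aliases
--     new_aliases = {}
--     for name, people in aliases.items():
--         new_people = people.copy()
--         for alias in [n for n in people if '@' in n]:
--             new_people.remove(alias)
--             new_people.update(aliases[alias])
--         new_aliases[name] = new_people
--     return resolve_aliases(new_aliases)
-- ===== SOURCE B (Python) =====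
-- def resolve_aliases(aliases: dict[str, set[str]]):
--     """Expand all aliases in one pass: each member that is an alias ('@' in it)
--     is resolved to its set of base names by a memoized depth-first expansion."""
--     memo = {}
--
--     def expand(alias):
--         if alias not in memo:
--             names = set()
--             for member in aliases[alias]:
--                 if '@' in member:
--                     names |= expand(member)
--                 else:
--                     names.add(member)
--             memo[alias] = names
--         return memo[alias]
--
--     resolved = {}
--     for name, people in aliases.items():
--         names = {p for p in people if '@' not in p}
--         for p in people:
--             if '@' in p:
--                 names |= expand(p)
--         resolved[name] = names
--     return resolved
-- ===== Notes on version B (the rewrite author's own statement) =====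
-- stated objective: alternative
-- what changed: B replaces A's repeated whole-dict rewrite passes (recursing until no '@' member is left) with a single pass over the dict that resolves each alias member once by memoized depth-first expansion.
import Mathlib
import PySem

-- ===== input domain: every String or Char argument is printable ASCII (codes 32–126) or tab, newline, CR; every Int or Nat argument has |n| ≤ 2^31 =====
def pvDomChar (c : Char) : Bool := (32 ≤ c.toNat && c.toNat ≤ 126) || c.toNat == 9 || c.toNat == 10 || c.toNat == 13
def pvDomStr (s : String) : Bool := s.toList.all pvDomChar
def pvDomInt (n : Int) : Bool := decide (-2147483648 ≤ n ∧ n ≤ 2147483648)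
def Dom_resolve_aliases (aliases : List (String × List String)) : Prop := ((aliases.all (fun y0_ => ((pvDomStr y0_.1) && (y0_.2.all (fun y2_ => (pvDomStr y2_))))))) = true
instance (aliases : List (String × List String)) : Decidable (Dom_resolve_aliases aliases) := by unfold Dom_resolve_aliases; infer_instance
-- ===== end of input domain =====

-- B replaces A's repeated whole-dict rewrite passes with a single pass that resolves each alias
-- member once by memoized depth-first expansion (objective: alternative algorithm).
-- Python's result sets are UNORDERED; both ports return every result set as the sorted list of its
-- elements (the canonical representative — set outputs are compared as finite sets).

-- ===== PORT A =====
-- canonical list representative of an unordered Python set (used by both ports on the final values)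
def pvCanon (s : List String) : List String := PySem.List.sorted s (fun x => x) false

-- `(PySem.Set.remove? …).getD` and `d.getD al []` are totalization guards for Python's KeyError
-- (set.remove of an absent element / a missing alias key), unreachable under Pre_; the fuel
-- `aliases.length + 2` bounds the recursion depth and is ample for every input on which Python A returns.
def pvExpandOnce (d : PySem.Dict String (List String)) (people : List String) : List String :=
  (people.filter (fun n => PySem.Str.isIn "@" n)).foldl
    (fun new_people al =>
      PySem.Set.update ((PySem.Set.remove? new_people al).getD new_people) (d.getD al []))
    people

def pvResolveGo : Nat → PySem.Dict String (List String) → PySem.Dict String (List String)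
  | 0, d => d
  | fuel+1, d =>
    if d.values.all (fun v => v.all (fun name => !PySem.Str.isIn "@" name)) then d
    else pvResolveGo fuel
      (d.items.foldl (fun nd kv => nd.insert kv.1 (pvExpandOnce d kv.2)) PySem.Dict.empty)

def resolve_aliases (aliases : List (String × List String)) : List (String × List String) :=
  ((pvResolveGo (aliases.length + 2) (PySem.Dict.ofList aliases)).items).map
    (fun kv => (kv.1, pvCanon kv.2))

-- ===== PORT B =====
-- memoized depth-first expansion; the fuel `aliases.length + 1` bounds the recursion depth (ample
-- whenever Python B returns) and `.getD al []` is the KeyError guard, unreachable under Pre_.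
def pvExpandAlt (d : PySem.Dict String (List String)) :
    Nat → PySem.Dict String (List String) → String → List String × PySem.Dict String (List String)
  | 0, memo, _ => (PySem.Set.empty, memo)
  | fuel+1, memo, al =>
    match memo.get? al with
    | some ns => (ns, memo)
    | none =>
      let r := (d.getD al []).foldl
        (fun (acc : List String × PySem.Dict String (List String)) member =>
          if PySem.Str.isIn "@" member then
            let e := pvExpandAlt d fuel acc.2 member
            (PySem.Set.union acc.1 e.1, e.2)
          else
            (PySem.Set.add acc.1 member, acc.2)) (PySem.Set.empty, memo)
      (r.1, r.2.insert al r.1)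

def resolve_aliases_alt (aliases : List (String × List String)) : List (String × List String) :=
  (((PySem.Dict.ofList aliases).items.foldl
    (fun (acc : PySem.Dict String (List String) × PySem.Dict String (List String)) kv =>
      let start := PySem.Set.ofList (kv.2.filter (fun p => !PySem.Str.isIn "@" p))
      let r := kv.2.foldl
        (fun (acc2 : List String × PySem.Dict String (List String)) p =>
          if PySem.Str.isIn "@" p then
            let e := pvExpandAlt (PySem.Dict.ofList aliases) (aliases.length + 1) acc2.2 p
            (PySem.Set.union acc2.1 e.1, e.2)
          else acc2) (start, acc.2)
      (acc.1.insert kv.1 r.1, r.2)) (PySem.Dict.empty, PySem.Dict.empty)).1.items).map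
    (fun kv => (kv.1, pvCanon kv.2))

-- ===== PRECONDITION & SPEC =====
-- the value set bound to k (getD over the dict built from the input)
def pvVals (aliases : List (String × List String)) (k : String) : List String :=
  (PySem.Dict.ofList aliases).getD k []

-- the alias members of k's value: the edges of the reference graph
def pvSucc (aliases : List (String × List String)) (k : String) : List String :=
  (pvVals aliases k).filter (fun n => PySem.Str.isIn "@" n)

-- one round of closing a set of names under the reference edges (input-graph reachability,
-- not a run of either program)
def pvStep (aliases : List (String × List String)) (S : List String) : List String :=
  PySem.Set.update S (S.flatMap (pvSucc aliases))

def pvReach (aliases : List (String × List String)) : Nat → List String → List String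
  | 0, S => S
  | f+1, S => pvReach aliases f (pvStep aliases S)

-- Pre_ admits exactly the valid dict-of-sets representations (keys distinct, each value list
-- duplicate-free — automatic for a Python dict[str, set[str]]) on which A returns: it excludes
-- only inputs where A raises — a '@' member that is not a key (KeyError) and cyclic alias
-- references (RecursionError); acyclicity is stated as input-graph reachability: no key reaches
-- itself in ≤ n closure rounds of the reference relation.
def Pre_resolve_aliases (aliases : List (String × List String)) : Prop :=
  (aliases.map Prod.fst).Nodup ∧
  (∀ kv ∈ aliases, kv.2.Nodup) ∧
  (∀ kv ∈ aliases, ∀ m ∈ kv.2, PySem.Str.isIn "@" m = true → m ∈ aliases.map Prod.fst) ∧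
  (∀ kv ∈ aliases, kv.1 ∉ pvReach aliases aliases.length (PySem.Set.ofList (pvSucc aliases kv.1)))

instance (aliases : List (String × List String)) : Decidable (Pre_resolve_aliases aliases) := by
  unfold Pre_resolve_aliases; infer_instance

def pvWitness_resolve_aliases : (List (String × List String)) :=
  [("@devs", ["alice", "@ops"]), ("@ops", ["@base", "carol"]), ("@base", ["bob"])]

def Spec_resolve_aliases (aliases : List (String × List String)) (out : List (String × List String)) : Prop :=
  out = resolve_aliases_alt aliases
instance (aliases : List (String × List String)) (out : List (String × List String)) : Decidable (Spec_resolve_aliases aliases out) := by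
  unfold Spec_resolve_aliases; infer_instance

-- ===== CLAIM (what is proved, stated in full; the proofs are below) =====
def Claim_equal_resolve_aliases : Prop := ∀ (aliases : List (String × List String)), Dom_resolve_aliases aliases → Pre_resolve_aliases aliases → Spec_resolve_aliases aliases (resolve_aliases aliases)

-- ===== LEMMAS AND PROOFS =====

-- `b is a base name reachable from m` in the input's reference graph
inductive pvRch (al : List (String × List String)) : String → String → Prop
  | base (m : String) : PySem.Str.isIn "@" m = false → pvRch al m m
  | step (m x b : String) : PySem.Str.isIn "@" m = true → x ∈ pvVals al m →
      pvRch al x b → pvRch al m b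

-- the semantic value of a member list: the base names reachable from its members
def pvV (al : List (String × List String)) (L : List String) (b : String) : Prop :=
  ∃ m ∈ L, pvRch al m b

-- μ-measure of a name: size of its reachable closure (strictly decreasing along edges; drives
-- both A's pass count and B's recursion depth)
def pvMu (al : List (String × List String)) (x : String) : Nat :=
  (PySem.Set.add (pvReach al al.length (PySem.Set.ofList (pvSucc al x))) x).length

-- a well-formed entry with key k under alias-measure bound B
def pvGoodE (al : List (String × List String)) (B : Nat) (k : String) (L : List String) : Prop :=
  L.Nodup ∧
  ∀ x ∈ L, PySem.Str.isIn "@" x = true →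
    x ∈ al.map Prod.fst ∧ pvMu al x ≤ B ∧
    (PySem.Str.isIn "@" k = true → pvMu al x < pvMu al k)

-- B's memo stores only correct, duplicate-free expansions
def pvMInv (al : List (String × List String)) (memo : PySem.Dict String (List String)) : Prop :=
  ∀ p ∈ memo.items, p.2.Nodup ∧ ∀ b, b ∈ p.2 ↔ pvRch al p.1 b

-- ---- generic list/set helpers ----

lemma pv_subset_nodup_length_le {l₁ l₂ : List String} (hs : l₁ ⊆ l₂) (h₁ : l₁.Nodup) :
    l₁.length ≤ l₂.length := by
  calc l₁.length = l₁.toFinset.card := (List.toFinset_card_of_nodup h₁).symm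
    _ ≤ l₂.toFinset.card := Finset.card_le_card (fun y hy => by
        simp only [List.mem_toFinset] at hy ⊢; exact hs hy)
    _ ≤ l₂.length := l₂.toFinset_card_le

lemma pv_subset_nodup_length_lt {l₁ l₂ : List String} (hs : l₁ ⊆ l₂) (h₁ : l₁.Nodup)
    (h₂ : l₂.Nodup) {y : String} (hy : y ∈ l₂) (hny : y ∉ l₁) : l₁.length < l₂.length := by
  have := Finset.card_lt_card (s := l₁.toFinset) (t := l₂.toFinset) (by
    constructor
    · intro z hz; simp only [List.mem_toFinset] at hz ⊢; exact hs hz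
    · intro hsub
      exact hny (by simpa using hsub (by simpa using hy)))
  rwa [List.toFinset_card_of_nodup h₁, List.toFinset_card_of_nodup h₂] at this

lemma pv_update_eq_self {S xs : List String} (h : ∀ x ∈ xs, x ∈ S) :
    PySem.Set.update S xs = S := by
  rw [PySem.Set.update_eq_append_filter]
  have : (PySem.Set.ofList xs).filter (fun y => !(PySem.Set.contains S y)) = [] := by
    rw [List.filter_eq_nil_iff]
    intro a ha
    have hmem : a ∈ S := h a ((PySem.Set.mem_ofList _ _).mp ha)
    simp [hmem]
  rw [this, List.append_nil]

lemma pv_removeD (S : List String) (a : String) :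
    (PySem.Set.remove? S a).getD S = PySem.Set.discard S a := by
  by_cases hm : a ∈ S
  · rw [PySem.Set.remove?_of_mem hm]; rfl
  · rw [(PySem.Set.remove?_eq_none_iff _ _).mpr hm]
    have : PySem.Set.discard S a = S := by
      unfold PySem.Set.discard
      rw [List.filter_eq_self]
      intro x hx
      have hne : x ≠ a := fun he => hm (he ▸ hx)
      simp [hne]
    rw [this]; rfl

lemma pv_items_ofList (ps : List (String × List String)) (h : (ps.map Prod.fst).Nodup) :
    (PySem.Dict.ofList ps).items = ps := by
  have := PySem.Dict.items_foldl_insert_fresh ps Prod.fst Prod.snd PySem.Dict.empty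
    (by intro a _; simp [PySem.Dict.contains_empty]) h
  simpa [PySem.Dict.ofList, PySem.Dict.update] using this

lemma pv_getD_entry {al : List (String × List String)} (h : (al.map Prod.fst).Nodup)
    {kv : String × List String} (hkv : kv ∈ al) : pvVals al kv.1 = kv.2 := by
  unfold pvVals
  have hitems : (kv.1, kv.2) ∈ (PySem.Dict.ofList al).items := by
    rw [pv_items_ofList al h]; exact hkv
  have hkeys : (PySem.Dict.ofList al).keys.Nodup := by
    have : (PySem.Dict.ofList al).keys = al.map Prod.fst := by
      simp only [PySem.Dict.keys, pv_items_ofList al h]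
    rw [this]; exact h
  exact PySem.Dict.getD_of_mem_items _ hitems hkeys []

-- ---- reachability closure and the μ-measure ----

lemma pv_sub_step (al : List (String × List String)) (S : List String) : S ⊆ pvStep al S := by
  intro x hx
  exact (PySem.Set.mem_update _ _ _).mpr (Or.inl hx)

lemma pv_sub_reach (al : List (String × List String)) (f : Nat) (S : List String) :
    S ⊆ pvReach al f S := by
  induction f generalizing S with
  | zero => intro x hx; exact hx
  | succ f ih =>
    intro x hx
    exact ih (pvStep al S) (pv_sub_step al S hx)

lemma pv_nodup_step (al : List (String × List String)) {S : List String} (h : S.Nodup) :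
    (pvStep al S).Nodup := PySem.Set.nodup_update _ _ h

lemma pv_nodup_reach (al : List (String × List String)) (f : Nat) {S : List String} (h : S.Nodup) :
    (pvReach al f S).Nodup := by
  induction f generalizing S with
  | zero => exact h
  | succ f ih => exact ih (pv_nodup_step al h)

lemma pv_reach_sub_closed (al : List (String × List String)) {C : List String}
    (hC : ∀ x ∈ C, ∀ y ∈ pvSucc al x, y ∈ C) :
    ∀ f {S : List String}, S ⊆ C → pvReach al f S ⊆ C := by
  intro f
  induction f with
  | zero => intro S hS; exact hS
  | succ f ih =>
    intro S hS
    refine ih ?_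
    intro x hx
    rcases (PySem.Set.mem_update _ _ _).mp hx with h | h
    · exact hS h
    · rcases List.mem_flatMap.mp h with ⟨z, hz, hy⟩
      exact hC z (hS hz) x hy

lemma pv_reach_of_fixed (al : List (String × List String)) {S : List String}
    (h : pvStep al S = S) : ∀ f, pvReach al f S = S := by
  intro f
  induction f with
  | zero => rfl
  | succ f ih =>
    show pvReach al f (pvStep al S) = S
    rw [h]
    exact ih

-- alias keys of the input
def pvA (al : List (String × List String)) : List String :=
  (al.map Prod.fst).filter (fun k => PySem.Str.isIn "@" k)

lemma pv_succ_sub_A (al : List (String × List String))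
    (hk : (al.map Prod.fst).Nodup)
    (hcl : ∀ kv ∈ al, ∀ m ∈ kv.2, PySem.Str.isIn "@" m = true → m ∈ al.map Prod.fst) :
    ∀ x, ∀ y ∈ pvSucc al x, y ∈ pvA al := by
  intro x y hy
  have hyv : y ∈ pvVals al x := List.mem_of_mem_filter hy
  have hyal : PySem.Str.isIn "@" y = true := by simpa using List.of_mem_filter hy
  cases hg : (PySem.Dict.ofList al).get? x with
  | none =>
    exfalso
    unfold pvVals at hyv
    rw [PySem.Dict.getD_of_get?_eq_none _ [] hg] at hyv
    simp at hyv
  | some v =>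
    have hmem : (x, v) ∈ (PySem.Dict.ofList al).items :=
      PySem.Dict.mem_items_of_get?_eq_some _ hg
    rw [pv_items_ofList al hk] at hmem
    have hv : pvVals al x = v := by
      have := pv_getD_entry hk hmem
      simpa using this
    rw [hv] at hyv
    have := hcl (x, v) hmem y hyv hyal
    unfold pvA
    exact List.mem_filter.mpr ⟨this, by simpa using hyal⟩

lemma pv_A_len (al : List (String × List String)) : (pvA al).length ≤ al.length := by
  calc (pvA al).length ≤ (al.map Prod.fst).length := List.length_filter_le _ _
    _ = al.length := List.length_map ..

-- after `al.length` closure rounds the reach set is a fixed point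
lemma pv_reach_fixed (al : List (String × List String))
    (hk : (al.map Prod.fst).Nodup)
    (hcl : ∀ kv ∈ al, ∀ m ∈ kv.2, PySem.Str.isIn "@" m = true → m ∈ al.map Prod.fst) :
    ∀ f {S : List String}, S.Nodup → S ⊆ pvA al → (pvA al).length ≤ S.length + f →
      pvStep al (pvReach al f S) = pvReach al f S := by
  intro f
  induction f with
  | zero =>
    intro S hnd hSA hlen
    show pvStep al S = S
    have hAS : ∀ y ∈ pvA al, y ∈ S := by
      intro y hy
      by_contra hny
      have := pv_subset_nodup_length_lt hSA hnd
        (hk.filter _) hy hny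
      omega
    apply pv_update_eq_self
    intro x hx
    rcases List.mem_flatMap.mp hx with ⟨z, hz, hy⟩
    exact hAS x (pv_succ_sub_A al hk hcl z x hy)
  | succ f ih =>
    intro S hnd hSA hlen
    by_cases hst : pvStep al S = S
    · have hr : pvReach al (f+1) S = S := pv_reach_of_fixed al hst (f+1)
      rw [hr, hst]
    · show pvStep al (pvReach al f (pvStep al S)) = pvReach al f (pvStep al S)
      have hsub : pvStep al S ⊆ pvA al := by
        intro x hx
        rcases (PySem.Set.mem_update _ _ _).mp hx with h | h
        · exact hSA h
        · rcases List.mem_flatMap.mp h with ⟨z, hz, hy⟩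
          exact pv_succ_sub_A al hk hcl z x hy
      have hlen' : S.length + 1 ≤ (pvStep al S).length := by
        have heq : pvStep al S = S ++ (PySem.Set.ofList (S.flatMap (pvSucc al))).filter
            (fun y => !(PySem.Set.contains S y)) := PySem.Set.update_eq_append_filter ..
        rcases hfe : (PySem.Set.ofList (S.flatMap (pvSucc al))).filter
            (fun y => !(PySem.Set.contains S y)) with _ | ⟨t, ts⟩
        · exfalso; apply hst; rw [heq, hfe, List.append_nil]
        · rw [heq, hfe]; simp
      exact ih (pv_nodup_step al hnd) hsub (by omega)

lemma pv_reach_closed (al : List (String × List String))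
    (hk : (al.map Prod.fst).Nodup)
    (hcl : ∀ kv ∈ al, ∀ m ∈ kv.2, PySem.Str.isIn "@" m = true → m ∈ al.map Prod.fst)
    (x : String) :
    ∀ z ∈ pvReach al al.length (PySem.Set.ofList (pvSucc al x)),
      ∀ y ∈ pvSucc al z, y ∈ pvReach al al.length (PySem.Set.ofList (pvSucc al x)) := by
  have hfix := pv_reach_fixed al hk hcl al.length
    (S := PySem.Set.ofList (pvSucc al x)) (PySem.Set.nodup_ofList _)
    (by intro y hy; exact pv_succ_sub_A al hk hcl x y ((PySem.Set.mem_ofList _ _).mp hy))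
    (by have := pv_A_len al; omega)
  intro z hz y hy
  have : y ∈ pvStep al (pvReach al al.length (PySem.Set.ofList (pvSucc al x))) :=
    (PySem.Set.mem_update _ _ _).mpr (Or.inr (List.mem_flatMap.mpr ⟨z, hz, hy⟩))
  rwa [hfix] at this

lemma pv_mu_pos (al : List (String × List String)) (x : String) : 1 ≤ pvMu al x := by
  unfold pvMu
  have : x ∈ PySem.Set.add (pvReach al al.length (PySem.Set.ofList (pvSucc al x))) x :=
    (PySem.Set.mem_add _ _ _).mpr (Or.inr rfl)
  exact List.length_pos_of_mem this

lemma pv_mu_le (al : List (String × List String))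
    (hk : (al.map Prod.fst).Nodup)
    (hcl : ∀ kv ∈ al, ∀ m ∈ kv.2, PySem.Str.isIn "@" m = true → m ∈ al.map Prod.fst)
    {x : String} (hx : x ∈ al.map Prod.fst) :
    pvMu al x ≤ al.length := by
  unfold pvMu
  have hsub : PySem.Set.add (pvReach al al.length (PySem.Set.ofList (pvSucc al x))) x
      ⊆ al.map Prod.fst := by
    intro y hy
    rcases (PySem.Set.mem_add _ _ _).mp hy with h | rfl
    · have : y ∈ pvA al := pv_reach_sub_closed al
        (fun z hz w hw => pv_succ_sub_A al hk hcl z w hw) al.length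
        (fun w hw => pv_succ_sub_A al hk hcl x w ((PySem.Set.mem_ofList _ _).mp hw)) h
      exact List.mem_of_mem_filter this
    · exact hx
  have hnd : (PySem.Set.add (pvReach al al.length (PySem.Set.ofList (pvSucc al x))) x).Nodup :=
    PySem.Set.nodup_add _ _ (pv_nodup_reach al al.length (PySem.Set.nodup_ofList _))
  calc _ ≤ (al.map Prod.fst).length := pv_subset_nodup_length_le hsub hnd
    _ = al.length := List.length_map ..

-- the measure strictly decreases along a reference edge (needs acyclicity)
lemma pv_mu_lt (al : List (String × List String))
    (hk : (al.map Prod.fst).Nodup)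
    (hcl : ∀ kv ∈ al, ∀ m ∈ kv.2, PySem.Str.isIn "@" m = true → m ∈ al.map Prod.fst)
    (hac : ∀ kv ∈ al, kv.1 ∉ pvReach al al.length (PySem.Set.ofList (pvSucc al kv.1)))
    {a x : String} (ha : a ∈ al.map Prod.fst) (hxa : x ∈ pvSucc al a) :
    pvMu al x < pvMu al a := by
  set Ra := pvReach al al.length (PySem.Set.ofList (pvSucc al a)) with hRa
  set Rx := pvReach al al.length (PySem.Set.ofList (pvSucc al x)) with hRx
  have hxRa : x ∈ Ra :=
    pv_sub_reach al al.length _ ((PySem.Set.mem_ofList _ _).mpr hxa)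
  have hclRa : ∀ z ∈ Ra, ∀ y ∈ pvSucc al z, y ∈ Ra := pv_reach_closed al hk hcl a
  have hRxRa : Rx ⊆ Ra := by
    apply pv_reach_sub_closed al hclRa al.length
    intro y hy
    exact hclRa x hxRa y ((PySem.Set.mem_ofList _ _).mp hy)
  have haRa : a ∉ Ra := by
    rcases List.mem_map.mp ha with ⟨kv, hkv, hfst⟩
    have := hac kv hkv
    rw [hfst] at this
    exact this
  have hane : a ≠ x := fun h => haRa (h ▸ hxRa)
  apply pv_subset_nodup_length_lt (y := a)
  · intro y hy
    rcases (PySem.Set.mem_add _ _ _).mp hy with h | rfl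
    · exact (PySem.Set.mem_add _ _ _).mpr (Or.inl (hRxRa h))
    · exact (PySem.Set.mem_add _ _ _).mpr (Or.inl hxRa)
  · exact PySem.Set.nodup_add _ _ (pv_nodup_reach al al.length (PySem.Set.nodup_ofList _))
  · exact PySem.Set.nodup_add _ _ (pv_nodup_reach al al.length (PySem.Set.nodup_ofList _))
  · exact (PySem.Set.mem_add _ _ _).mpr (Or.inr rfl)
  · intro h
    rcases (PySem.Set.mem_add _ _ _).mp h with h | h
    · exact haRa (hRxRa h)
    · exact hane h

-- ---- pvRch basics ----

lemma pv_rch_base_eq {al : List (String × List String)} {m b : String}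
    (h : pvRch al m b) (hm : PySem.Str.isIn "@" m = false) : b = m := by
  cases h with
  | base _ _ => rfl
  | step _ x _ hal _ _ => rw [hal] at hm; exact absurd hm (by decide)

lemma pv_rch_step_iff {al : List (String × List String)} {m : String}
    (hm : PySem.Str.isIn "@" m = true) (b : String) :
    pvRch al m b ↔ ∃ x ∈ pvVals al m, pvRch al x b := by
  constructor
  · intro h
    cases h with
    | base _ hmf => rw [hm] at hmf; exact absurd hmf (by decide)
    | step _ x _ _ hx hr => exact ⟨x, hx, hr⟩
  · rintro ⟨x, hx, hr⟩
    exact pvRch.step m x b hm hx hr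

-- ---- A's inner pass over one entry ----

-- A's per-alias step on one entry
def pvG (d : PySem.Dict String (List String)) (S : List String) (a : String) : List String :=
  PySem.Set.update ((PySem.Set.remove? S a).getD S) (d.getD a [])

lemma pv_g_eq (d : PySem.Dict String (List String)) (S : List String) (a : String) :
    pvG d S a = PySem.Set.update (PySem.Set.discard S a) (d.getD a []) := by
  unfold pvG; rw [pv_removeD]

lemma pv_mem_g (d : PySem.Dict String (List String)) (S : List String) (a x : String) :
    x ∈ pvG d S a ↔ (x ∈ S ∧ x ≠ a) ∨ x ∈ d.getD a [] := by
  rw [pv_g_eq, PySem.Set.mem_update, PySem.Set.mem_discard]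

lemma pv_nodup_g (d : PySem.Dict String (List String)) {S : List String} (a : String)
    (h : S.Nodup) : (pvG d S a).Nodup := by
  rw [pv_g_eq]; exact PySem.Set.nodup_update _ _ (PySem.Set.nodup_discard _ _ h)

lemma pv_fold_nodup (d : PySem.Dict String (List String)) :
    ∀ (as S : List String), S.Nodup → (as.foldl (pvG d) S).Nodup := by
  intro as
  induction as with
  | nil => intro S h; exact h
  | cons a as ih => intro S h; exact ih _ (pv_nodup_g d a h)

lemma pv_fold_base_mem (d : PySem.Dict String (List String)) :
    ∀ (as S : List String), (∀ a ∈ as, PySem.Str.isIn "@" a = true) →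
      ∀ x ∈ S, PySem.Str.isIn "@" x = false → x ∈ as.foldl (pvG d) S := by
  intro as
  induction as with
  | nil => intro S _ x hx _; exact hx
  | cons a as ih =>
    intro S hal x hx hxb
    refine ih _ (fun a' ha' => hal a' (by simp [ha'])) x ?_ hxb
    refine (pv_mem_g d S a x).mpr (Or.inl ⟨hx, ?_⟩)
    intro he
    rw [he, hal a (by simp)] at hxb
    exact absurd hxb (by decide)

lemma pv_fold_V_mono (al : List (String × List String)) (d : PySem.Dict String (List String)) :
    ∀ (as S : List String), (∀ a ∈ as, ∀ b, pvV al (d.getD a []) b ↔ pvRch al a b) →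
      ∀ b, pvV al S b → pvV al (as.foldl (pvG d) S) b := by
  intro as
  induction as with
  | nil => intro S _ b hv; exact hv
  | cons a as ih =>
    intro S hd b hv
    refine ih _ (fun a' ha' => hd a' (by simp [ha'])) b ?_
    rcases hv with ⟨y, hy, hr⟩
    by_cases hya : y = a
    · subst hya
      rcases ((hd y (by simp) b).mpr hr) with ⟨x, hx, hrx⟩
      exact ⟨x, (pv_mem_g d S y x).mpr (Or.inr hx), hrx⟩
    · exact ⟨y, (pv_mem_g d S a y).mpr (Or.inl ⟨hy, hya⟩), hr⟩

lemma pv_fold_V_of_alias (al : List (String × List String)) (d : PySem.Dict String (List String)) :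
    ∀ (as S : List String), (∀ a ∈ as, ∀ b, pvV al (d.getD a []) b ↔ pvRch al a b) →
      ∀ a ∈ as, ∀ b, pvRch al a b → pvV al (as.foldl (pvG d) S) b := by
  intro as
  induction as with
  | nil => intro S _ a ha; exact absurd ha (by simp)
  | cons a' as ih =>
    intro S hd a ha b hr
    rcases List.mem_cons.mp ha with rfl | ha
    · rcases (hd a (by simp) b).mpr hr with ⟨x, hx, hrx⟩
      refine pv_fold_V_mono al d as _ (fun a'' ha'' => hd a'' (by simp [ha''])) b ?_
      exact ⟨x, (pv_mem_g d S a x).mpr (Or.inr hx), hrx⟩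
    · exact ih _ (fun a'' ha'' => hd a'' (by simp [ha''])) a ha b hr

lemma pv_fold_V_upper (al : List (String × List String)) (d : PySem.Dict String (List String)) :
    ∀ (as S : List String), (∀ a ∈ as, ∀ b, pvV al (d.getD a []) b ↔ pvRch al a b) →
      as.Nodup → (∀ a ∈ as, a ∈ S) →
      ∀ b, pvV al (as.foldl (pvG d) S) b → pvV al S b := by
  intro as
  induction as with
  | nil => intro S _ _ _ b hv; exact hv
  | cons a as ih =>
    intro S hd hnd hsub b hv
    have hres := ih (pvG d S a)
      (fun a' ha' => hd a' (by simp [ha']))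
      hnd.of_cons
      (by
        intro a' ha'
        refine (pv_mem_g d S a a').mpr (Or.inl ⟨hsub a' (by simp [ha']), ?_⟩)
        intro he
        exact (List.nodup_cons.mp hnd).1 (he ▸ ha'))
      b hv
    rcases hres with ⟨y, hy, hr⟩
    rcases (pv_mem_g d S a y).mp hy with ⟨h1, _⟩ | h2
    · exact ⟨y, h1, hr⟩
    · have : pvV al (d.getD a []) b := ⟨y, h2, hr⟩
      exact ⟨a, hsub a (by simp), (hd a (by simp) b).mp this⟩

-- membership in the semantic value is preserved by A's per-entry pass
lemma pv_entry_V (al : List (String × List String)) (d : PySem.Dict String (List String))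
    {S : List String} (hnd : S.Nodup)
    (hd : ∀ a ∈ S.filter (fun n => PySem.Str.isIn "@" n), ∀ b,
      pvV al (d.getD a []) b ↔ pvRch al a b) :
    ∀ b, pvV al ((S.filter (fun n => PySem.Str.isIn "@" n)).foldl (pvG d) S) b ↔ pvV al S b := by
  intro b
  constructor
  · exact fun h => pv_fold_V_upper al d _ S hd (hnd.filter _)
      (fun a ha => List.mem_of_mem_filter ha) b h
  · rintro ⟨y, hy, hr⟩
    by_cases hyal : PySem.Str.isIn "@" y = true
    · exact pv_fold_V_of_alias al d _ S hd y (List.mem_filter.mpr ⟨hy, by simpa using hyal⟩) b hr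
    · have hyb : PySem.Str.isIn "@" y = false := by simpa using hyal
      have hby : b = y := pv_rch_base_eq hr hyb
      subst hby
      exact ⟨b, pv_fold_base_mem d _ S
        (fun a ha => by simpa using List.of_mem_filter ha) b hy hyb, hr⟩

lemma pv_fold_alias_origin (d : PySem.Dict String (List String)) (P : String → Prop) :
    ∀ (as S : List String), (∀ x ∈ S, PySem.Str.isIn "@" x = true → x ∈ as ∨ P x) →
      (∀ a ∈ as, ∀ x ∈ d.getD a [], PySem.Str.isIn "@" x = true → P x) →
      ∀ x ∈ as.foldl (pvG d) S, PySem.Str.isIn "@" x = true → P x := by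
  intro as
  induction as with
  | nil =>
    intro S h1 _ x hx hal
    rcases h1 x hx hal with h | h
    · exact absurd h (by simp)
    · exact h
  | cons a as ih =>
    intro S h1 h2 x hx hal
    refine ih (pvG d S a) ?_ (fun a' ha' => h2 a' (by simp [ha'])) x hx hal
    intro y hy hyal
    rcases (pv_mem_g d S a y).mp hy with ⟨hyS, hyne⟩ | hyv
    · rcases h1 y hyS hyal with h | h
      · rcases List.mem_cons.mp h with rfl | h
        · exact absurd rfl hyne
        · exact Or.inl h
      · exact Or.inr h
    · exact Or.inr (h2 a (by simp) y hyv hyal)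

-- ---- A's whole-dict iteration ----

lemma pv_keys_items (d : PySem.Dict String (List String)) : d.keys = d.items.map Prod.fst := by
  simp only [PySem.Dict.keys]

lemma pv_go_spec (al : List (String × List String))
    (hk : (al.map Prod.fst).Nodup) :
    ∀ (B fuel : Nat) (d : PySem.Dict String (List String)),
      B + 1 ≤ fuel →
      d.items.map Prod.fst = al.map Prod.fst →
      (∀ kv ∈ d.items, pvGoodE al B kv.1 kv.2 ∧
        (∀ b, pvV al kv.2 b ↔ pvV al (pvVals al kv.1) b)) →
      (pvResolveGo fuel d).items.map Prod.fst = al.map Prod.fst ∧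
      ∀ kv ∈ (pvResolveGo fuel d).items, kv.2.Nodup ∧
        (∀ b, b ∈ kv.2 ↔ pvV al (pvVals al kv.1) b) := by
  intro B
  induction B with
  | zero =>
    intro fuel d hfuel hkeys hinv
    obtain ⟨f, rfl⟩ : ∃ f, fuel = f + 1 := ⟨fuel - 1, by omega⟩
    have hclean : d.values.all (fun v => v.all (fun name => !PySem.Str.isIn "@" name)) = true := by
      apply List.all_eq_true.mpr
      intro v hv
      apply List.all_eq_true.mpr
      intro x hx
      have hv' : v ∈ d.items.map Prod.snd := by simpa only [PySem.Dict.values] using hv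
      rcases List.mem_map.mp hv' with ⟨kv, hkv, rfl⟩
      by_contra hxb
      have hxal : PySem.Str.isIn "@" x = true := by simpa using hxb
      have := ((hinv kv hkv).1.2 x hx hxal).2.1
      have := pv_mu_pos al x
      omega
    rw [pvResolveGo, if_pos hclean]
    refine ⟨hkeys, ?_⟩
    intro kv hkv
    have hGE := (hinv kv hkv).1
    refine ⟨hGE.1, ?_⟩
    intro b
    have hcleankv : ∀ x ∈ kv.2, PySem.Str.isIn "@" x = false := by
      intro x hx
      by_contra hxb
      have hxal : PySem.Str.isIn "@" x = true := by simpa using hxb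
      have := (hGE.2 x hx hxal).2.1
      have := pv_mu_pos al x
      omega
    rw [← (hinv kv hkv).2 b]
    constructor
    · intro hb; exact ⟨b, hb, pvRch.base b (hcleankv b hb)⟩
    · rintro ⟨m, hm, hr⟩
      have := pv_rch_base_eq hr (hcleankv m hm)
      exact this ▸ hm
  | succ B ih =>
    intro fuel d hfuel hkeys hinv
    obtain ⟨f, rfl⟩ : ∃ f, fuel = f + 1 := ⟨fuel - 1, by omega⟩
    rw [pvResolveGo]
    by_cases hclean : d.values.all (fun v => v.all (fun name => !PySem.Str.isIn "@" name)) = true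
    · rw [if_pos hclean]
      refine ⟨hkeys, ?_⟩
      intro kv hkv
      have hGE := (hinv kv hkv).1
      refine ⟨hGE.1, ?_⟩
      intro b
      have hcleankv : ∀ x ∈ kv.2, PySem.Str.isIn "@" x = false := by
        intro x hx
        have hv : kv.2 ∈ d.values := by
          simp only [PySem.Dict.values]
          exact List.mem_map.mpr ⟨kv, hkv, rfl⟩
        have := List.all_eq_true.mp (List.all_eq_true.mp hclean kv.2 hv) x hx
        simpa using this
      rw [← (hinv kv hkv).2 b]
      constructor
      · intro hb; exact ⟨b, hb, pvRch.base b (hcleankv b hb)⟩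
      · rintro ⟨m, hm, hr⟩
        have := pv_rch_base_eq hr (hcleankv m hm)
        exact this ▸ hm
    · rw [if_neg hclean]
      have hdk : d.keys.Nodup := by rw [pv_keys_items, hkeys]; exact hk
      have hnd_items :
          (d.items.foldl (fun nd kv => nd.insert kv.1 (pvExpandOnce d kv.2)) PySem.Dict.empty).items
            = d.items.map (fun kv => (kv.1, pvExpandOnce d kv.2)) := by
        have := PySem.Dict.items_foldl_insert_fresh d.items Prod.fst
          (fun kv => pvExpandOnce d kv.2) PySem.Dict.empty
          (by intro a _; simp [PySem.Dict.contains_empty]) (by rw [hkeys]; exact hk)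
        simpa [PySem.Dict.empty] using this
      -- per-alias correctness of the current dict's entries
      have hdval : ∀ a, PySem.Str.isIn "@" a = true → a ∈ al.map Prod.fst →
          ∀ b, pvV al (d.getD a []) b ↔ pvRch al a b := by
        intro a hal ha b
        have : a ∈ d.items.map Prod.fst := by rw [hkeys]; exact ha
        rcases List.mem_map.mp this with ⟨p, hp, hpa⟩
        have hget : d.getD a [] = p.2 := by
          have : (a, p.2) ∈ d.items := by rw [← hpa]; exact hp
          exact PySem.Dict.getD_of_mem_items _ this hdk []
        rw [hget]
        have hmatch := (hinv p hp).2 b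
        rw [hpa] at hmatch
        rw [hmatch]
        rw [pv_rch_step_iff hal b]
        exact Iff.rfl
      refine ih f _ (by omega) (by rw [hnd_items, List.map_map]; exact hkeys) ?_
      rw [hnd_items]
      intro kv' hkv'
      rcases List.mem_map.mp hkv' with ⟨kv, hkv, rfl⟩
      have hGE := (hinv kv hkv).1
      have hd : ∀ a ∈ kv.2.filter (fun n => PySem.Str.isIn "@" n), ∀ b,
          pvV al (d.getD a []) b ↔ pvRch al a b := by
        intro a ha b
        have hal : PySem.Str.isIn "@" a = true := by simpa using List.of_mem_filter ha
        exact hdval a hal ((hGE.2 a (List.mem_of_mem_filter ha) hal).1) b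
      constructor
      · constructor
        · exact pv_fold_nodup d _ _ hGE.1
        · intro x hx hxal
          refine pv_fold_alias_origin d
            (fun x => x ∈ al.map Prod.fst ∧ pvMu al x ≤ B ∧
              (PySem.Str.isIn "@" kv.1 = true → pvMu al x < pvMu al kv.1)) _ _
            ?_ ?_ x hx hxal
          · intro y hy hyal
            exact Or.inl (List.mem_filter.mpr ⟨hy, by simpa using hyal⟩)
          · intro a ha y hy hyal
            have haal : PySem.Str.isIn "@" a = true := by simpa using List.of_mem_filter ha
            have haS : a ∈ kv.2 := List.mem_of_mem_filter ha
            have hGa := hGE.2 a haS haal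
            -- a is a key of d; its entry satisfies pvGoodE at key a
            have : a ∈ d.items.map Prod.fst := by rw [hkeys]; exact hGa.1
            rcases List.mem_map.mp this with ⟨p, hp, hpa⟩
            have hget : d.getD a [] = p.2 := by
              have : (a, p.2) ∈ d.items := by rw [← hpa]; exact hp
              exact PySem.Dict.getD_of_mem_items _ this hdk []
            rw [hget] at hy
            have hGp := (hinv p hp).1.2 y hy hyal
            rw [hpa] at hGp
            have hlt : pvMu al y < pvMu al a := hGp.2.2 haal
            refine ⟨hGp.1, by omega, ?_⟩
            intro hkval
            have := hGa.2.2 hkval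
            omega
      · intro b
        have := pv_entry_V al d hGE.1 hd b
        unfold pvExpandOnce
        rw [show (fun new_people al_ =>
            PySem.Set.update ((PySem.Set.remove? new_people al_).getD new_people)
              (d.getD al_ [])) = pvG d from rfl]
        rw [this]
        exact (hinv kv hkv).2 b

-- ---- B's memoized depth-first expansion ----

lemma pv_expand_spec (al : List (String × List String))
    (hk : (al.map Prod.fst).Nodup)
    (hcl : ∀ kv ∈ al, ∀ m ∈ kv.2, PySem.Str.isIn "@" m = true → m ∈ al.map Prod.fst)
    (hac : ∀ kv ∈ al, kv.1 ∉ pvReach al al.length (PySem.Set.ofList (pvSucc al kv.1))) :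
    ∀ (B fuel : Nat) (memo : PySem.Dict String (List String)) (a : String),
      B ≤ fuel → PySem.Str.isIn "@" a = true → a ∈ al.map Prod.fst → pvMu al a ≤ B →
      pvMInv al memo →
      (pvExpandAlt (PySem.Dict.ofList al) fuel memo a).1.Nodup ∧
      (∀ b, b ∈ (pvExpandAlt (PySem.Dict.ofList al) fuel memo a).1 ↔ pvRch al a b) ∧
      pvMInv al (pvExpandAlt (PySem.Dict.ofList al) fuel memo a).2 := by
  intro B
  induction B with
  | zero =>
    intro fuel memo a _ _ _ hmu _
    have := pv_mu_pos al a
    omega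
  | succ B ih =>
    intro fuel memo a hfuel hal ha hmu hminv
    obtain ⟨f, rfl⟩ : ∃ f, fuel = f + 1 := ⟨fuel - 1, by omega⟩
    cases hg : memo.get? a with
    | some ns =>
      have hred : pvExpandAlt (PySem.Dict.ofList al) (f+1) memo a = (ns, memo) := by
        rw [pvExpandAlt, hg]
      rw [hred]
      have hmem : (a, ns) ∈ memo.items := PySem.Dict.mem_items_of_get?_eq_some _ hg
      exact ⟨(hminv _ hmem).1, (hminv _ hmem).2, hminv⟩
    | none =>
      -- a is bound to the value list of one kv of al
      obtain ⟨kva, hkva, hkva1⟩ : ∃ kv ∈ al, kv.1 = a := by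
        rcases List.mem_map.mp ha with ⟨kv, hkv, hfst⟩
        exact ⟨kv, hkv, hfst⟩
      have hvals : pvVals al a = kva.2 := by rw [← hkva1]; exact pv_getD_entry hk hkva
      -- the member fold: bases are added, aliases are expanded recursively
      have inner : ∀ (l : List String), (∀ x ∈ l, x ∈ pvVals al a) →
          ∀ (ns : List String) (memo' : PySem.Dict String (List String)),
          ns.Nodup → pvMInv al memo' →
          ((l.foldl
            (fun (acc : List String × PySem.Dict String (List String)) member =>
              if PySem.Str.isIn "@" member then
                let e := pvExpandAlt (PySem.Dict.ofList al) f acc.2 member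
                (PySem.Set.union acc.1 e.1, e.2)
              else
                (PySem.Set.add acc.1 member, acc.2)) (ns, memo')).1.Nodup ∧
          (∀ b, b ∈ (l.foldl
            (fun (acc : List String × PySem.Dict String (List String)) member =>
              if PySem.Str.isIn "@" member then
                let e := pvExpandAlt (PySem.Dict.ofList al) f acc.2 member
                (PySem.Set.union acc.1 e.1, e.2)
              else
                (PySem.Set.add acc.1 member, acc.2)) (ns, memo')).1 ↔
            b ∈ ns ∨ ∃ m ∈ l, pvRch al m b) ∧
          pvMInv al (l.foldl
            (fun (acc : List String × PySem.Dict String (List String)) member =>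
              if PySem.Str.isIn "@" member then
                let e := pvExpandAlt (PySem.Dict.ofList al) f acc.2 member
                (PySem.Set.union acc.1 e.1, e.2)
              else
                (PySem.Set.add acc.1 member, acc.2)) (ns, memo')).2) := by
        intro l
        induction l with
        | nil =>
          intro _ ns memo' hnd hmi
          refine ⟨hnd, ?_, hmi⟩
          intro b; simp
        | cons m l ihl =>
          intro hlsub ns memo' hnd hmi
          have hmv : m ∈ pvVals al a := hlsub m (by simp)
          rw [List.foldl_cons]
          by_cases hmal : PySem.Str.isIn "@" m = true
          · rw [if_pos hmal]
            have hmkeys : m ∈ al.map Prod.fst := by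
              apply hcl kva hkva m (by rw [← hvals]; exact hmv) hmal
            have hmsucc : m ∈ pvSucc al a := by
              unfold pvSucc
              exact List.mem_filter.mpr ⟨hmv, by simpa using hmal⟩
            have hmlt : pvMu al m < pvMu al a := pv_mu_lt al hk hcl hac ha hmsucc
            have he := ih f memo' m (by omega) hmal hmkeys (by omega) hmi
            have hres := ihl (fun x hx => hlsub x (by simp [hx]))
              (PySem.Set.union ns (pvExpandAlt (PySem.Dict.ofList al) f memo' m).1)
              (pvExpandAlt (PySem.Dict.ofList al) f memo' m).2
              (PySem.Set.nodup_union _ _ hnd) he.2.2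
            refine ⟨hres.1, ?_, hres.2.2⟩
            intro b
            rw [hres.2.1 b, PySem.Set.mem_union]
            constructor
            · rintro ((h | h) | ⟨m', hm', hr⟩)
              · exact Or.inl h
              · exact Or.inr ⟨m, by simp, (he.2.1 b).mp h⟩
              · exact Or.inr ⟨m', by simp [hm'], hr⟩
            · rintro (h | ⟨m', hm', hr⟩)
              · exact Or.inl (Or.inl h)
              · rcases List.mem_cons.mp hm' with rfl | hm'
                · exact Or.inl (Or.inr ((he.2.1 b).mpr hr))
                · exact Or.inr ⟨m', hm', hr⟩
          · rw [if_neg hmal]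
            have hmb : PySem.Str.isIn "@" m = false := by simpa using hmal
            have hres := ihl (fun x hx => hlsub x (by simp [hx]))
              (PySem.Set.add ns m) memo' (PySem.Set.nodup_add _ _ hnd) hmi
            refine ⟨hres.1, ?_, hres.2.2⟩
            intro b
            rw [hres.2.1 b, PySem.Set.mem_add]
            constructor
            · rintro ((h | heq) | ⟨m', hm', hr⟩)
              · exact Or.inl h
              · exact Or.inr ⟨m, by simp, by rw [heq]; exact pvRch.base m hmb⟩
              · exact Or.inr ⟨m', by simp [hm'], hr⟩
            · rintro (h | ⟨m', hm', hr⟩)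
              · exact Or.inl (Or.inl h)
              · rcases List.mem_cons.mp hm' with rfl | hm'
                · exact Or.inl (Or.inr (pv_rch_base_eq hr hmb))
                · exact Or.inr ⟨m', hm', hr⟩
      have hres := inner (pvVals al a) (fun x hx => hx) PySem.Set.empty memo
        (by unfold PySem.Set.empty; exact List.nodup_nil) hminv
      have hred : pvExpandAlt (PySem.Dict.ofList al) (f+1) memo a =
          (((pvVals al a).foldl
            (fun (acc : List String × PySem.Dict String (List String)) member =>
              if PySem.Str.isIn "@" member then
                let e := pvExpandAlt (PySem.Dict.ofList al) f acc.2 member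
                (PySem.Set.union acc.1 e.1, e.2)
              else
                (PySem.Set.add acc.1 member, acc.2)) (PySem.Set.empty, memo)).1,
           (((pvVals al a).foldl
            (fun (acc : List String × PySem.Dict String (List String)) member =>
              if PySem.Str.isIn "@" member then
                let e := pvExpandAlt (PySem.Dict.ofList al) f acc.2 member
                (PySem.Set.union acc.1 e.1, e.2)
              else
                (PySem.Set.add acc.1 member, acc.2)) (PySem.Set.empty, memo)).2).insert a
            (((pvVals al a).foldl
            (fun (acc : List String × PySem.Dict String (List String)) member =>
              if PySem.Str.isIn "@" member then
                let e := pvExpandAlt (PySem.Dict.ofList al) f acc.2 member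
                (PySem.Set.union acc.1 e.1, e.2)
              else
                (PySem.Set.add acc.1 member, acc.2)) (PySem.Set.empty, memo)).1)) := by
        rw [pvExpandAlt, hg]
        rfl
      rw [hred]
      have hmemb : ∀ b, b ∈ ((pvVals al a).foldl
            (fun (acc : List String × PySem.Dict String (List String)) member =>
              if PySem.Str.isIn "@" member then
                let e := pvExpandAlt (PySem.Dict.ofList al) f acc.2 member
                (PySem.Set.union acc.1 e.1, e.2)
              else
                (PySem.Set.add acc.1 member, acc.2)) (PySem.Set.empty, memo)).1 ↔
          pvRch al a b := by
        intro b
        rw [hres.2.1 b, pv_rch_step_iff hal b]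
        simp [PySem.Set.empty]
      refine ⟨hres.1, hmemb, ?_⟩
      intro p hp
      rcases (PySem.Dict.mem_items_insert _ _ _ _).mp hp with rfl | ⟨hp', _⟩
      · exact ⟨hres.1, hmemb⟩
      · exact hres.2.2 p hp'

-- ---- B's single pass over the dict ----

lemma pv_b_fold (al : List (String × List String))
    (hk : (al.map Prod.fst).Nodup)
    (hcl : ∀ kv ∈ al, ∀ m ∈ kv.2, PySem.Str.isIn "@" m = true → m ∈ al.map Prod.fst)
    (hac : ∀ kv ∈ al, kv.1 ∉ pvReach al al.length (PySem.Set.ofList (pvSucc al kv.1))) :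
    ∀ (l : List (String × List String)) (res memo : PySem.Dict String (List String)),
      (∀ kv ∈ l, kv ∈ al) → (l.map Prod.fst).Nodup →
      (∀ kv ∈ l, res.contains kv.1 = false) → pvMInv al memo →
      ((l.foldl
        (fun (acc : PySem.Dict String (List String) × PySem.Dict String (List String)) kv =>
          let start := PySem.Set.ofList (kv.2.filter (fun p => !PySem.Str.isIn "@" p))
          let r := kv.2.foldl
            (fun (acc2 : List String × PySem.Dict String (List String)) p =>
              if PySem.Str.isIn "@" p then
                let e := pvExpandAlt (PySem.Dict.ofList al) (al.length + 1) acc2.2 p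
                (PySem.Set.union acc2.1 e.1, e.2)
              else acc2) (start, acc.2)
          (acc.1.insert kv.1 r.1, r.2)) (res, memo)).1.items.map Prod.fst
        = res.items.map Prod.fst ++ l.map Prod.fst) ∧
      ∀ kv ∈ (l.foldl
        (fun (acc : PySem.Dict String (List String) × PySem.Dict String (List String)) kv =>
          let start := PySem.Set.ofList (kv.2.filter (fun p => !PySem.Str.isIn "@" p))
          let r := kv.2.foldl
            (fun (acc2 : List String × PySem.Dict String (List String)) p =>
              if PySem.Str.isIn "@" p then
                let e := pvExpandAlt (PySem.Dict.ofList al) (al.length + 1) acc2.2 p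
                (PySem.Set.union acc2.1 e.1, e.2)
              else acc2) (start, acc.2)
          (acc.1.insert kv.1 r.1, r.2)) (res, memo)).1.items,
        kv ∈ res.items ∨ (kv.2.Nodup ∧ ∀ b, b ∈ kv.2 ↔ pvV al (pvVals al kv.1) b) := by
  intro l
  induction l with
  | nil =>
    intro res memo _ _ _ _
    exact ⟨by simp, fun kv hkv => Or.inl hkv⟩
  | cons kv l ihl =>
    intro res memo hsub hnd hfresh hminv
    have hkval : kv ∈ al := hsub kv (by simp)
    have hvals : pvVals al kv.1 = kv.2 := pv_getD_entry hk hkval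
    -- the per-entry fold: bases collected up front, aliases expanded
    have inner2 : ∀ (lm : List String), (∀ x ∈ lm, x ∈ kv.2) →
        ∀ (ns : List String) (memo' : PySem.Dict String (List String)),
        ns.Nodup → pvMInv al memo' →
        ((lm.foldl
          (fun (acc2 : List String × PySem.Dict String (List String)) p =>
            if PySem.Str.isIn "@" p then
              let e := pvExpandAlt (PySem.Dict.ofList al) (al.length + 1) acc2.2 p
              (PySem.Set.union acc2.1 e.1, e.2)
            else acc2) (ns, memo')).1.Nodup ∧
        (∀ b, b ∈ (lm.foldl
          (fun (acc2 : List String × PySem.Dict String (List String)) p =>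
            if PySem.Str.isIn "@" p then
              let e := pvExpandAlt (PySem.Dict.ofList al) (al.length + 1) acc2.2 p
              (PySem.Set.union acc2.1 e.1, e.2)
            else acc2) (ns, memo')).1 ↔
          b ∈ ns ∨ ∃ m ∈ lm, PySem.Str.isIn "@" m = true ∧ pvRch al m b) ∧
        pvMInv al (lm.foldl
          (fun (acc2 : List String × PySem.Dict String (List String)) p =>
            if PySem.Str.isIn "@" p then
              let e := pvExpandAlt (PySem.Dict.ofList al) (al.length + 1) acc2.2 p
              (PySem.Set.union acc2.1 e.1, e.2)
            else acc2) (ns, memo')).2) := by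
      intro lm
      induction lm with
      | nil =>
        intro _ ns memo' hnd' hmi
        refine ⟨hnd', ?_, hmi⟩
        intro b; simp
      | cons m lm ihm =>
        intro hlm ns memo' hnd' hmi
        rw [List.foldl_cons]
        by_cases hmal : PySem.Str.isIn "@" m = true
        · rw [if_pos hmal]
          have hmkeys : m ∈ al.map Prod.fst := hcl kv hkval m (hlm m (by simp)) hmal
          have he := pv_expand_spec al hk hcl hac al.length (al.length + 1) memo' m
            (by omega) hmal hmkeys (pv_mu_le al hk hcl hmkeys) hmi
          have hres := ihm (fun x hx => hlm x (by simp [hx]))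
            (PySem.Set.union ns (pvExpandAlt (PySem.Dict.ofList al) (al.length + 1) memo' m).1)
            (pvExpandAlt (PySem.Dict.ofList al) (al.length + 1) memo' m).2
            (PySem.Set.nodup_union _ _ hnd') he.2.2
          refine ⟨hres.1, ?_, hres.2.2⟩
          intro b
          rw [hres.2.1 b, PySem.Set.mem_union]
          constructor
          · rintro ((h | h) | ⟨m', hm', hal', hr⟩)
            · exact Or.inl h
            · exact Or.inr ⟨m, by simp, hmal, (he.2.1 b).mp h⟩
            · exact Or.inr ⟨m', by simp [hm'], hal', hr⟩
          · rintro (h | ⟨m', hm', hal', hr⟩)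
            · exact Or.inl (Or.inl h)
            · rcases List.mem_cons.mp hm' with rfl | hm'
              · exact Or.inl (Or.inr ((he.2.1 b).mpr hr))
              · exact Or.inr ⟨m', hm', hal', hr⟩
        · rw [if_neg hmal]
          have hres := ihm (fun x hx => hlm x (by simp [hx])) ns memo' hnd' hmi
          refine ⟨hres.1, ?_, hres.2.2⟩
          intro b
          rw [hres.2.1 b]
          constructor
          · rintro (h | ⟨m', hm', hal', hr⟩)
            · exact Or.inl h
            · exact Or.inr ⟨m', by simp [hm'], hal', hr⟩
          · rintro (h | ⟨m', hm', hal', hr⟩)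
            · exact Or.inl h
            · rcases List.mem_cons.mp hm' with rfl | hm'
              · rw [hal'] at hmal; exact absurd rfl hmal
              · exact Or.inr ⟨m', hm', hal', hr⟩
    have hstart : ∀ b, b ∈ PySem.Set.ofList (kv.2.filter (fun p => !PySem.Str.isIn "@" p)) ↔
        b ∈ kv.2 ∧ PySem.Str.isIn "@" b = false := by
      intro b
      rw [PySem.Set.mem_ofList, List.mem_filter]
      simp
    have hr := inner2 kv.2 (fun x hx => hx)
      (PySem.Set.ofList (kv.2.filter (fun p => !PySem.Str.isIn "@" p))) memo
      (PySem.Set.nodup_ofList _) hminv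
    rw [List.foldl_cons]
    have hentry : ∀ b, b ∈ (kv.2.foldl
        (fun (acc2 : List String × PySem.Dict String (List String)) p =>
          if PySem.Str.isIn "@" p then
            let e := pvExpandAlt (PySem.Dict.ofList al) (al.length + 1) acc2.2 p
            (PySem.Set.union acc2.1 e.1, e.2)
          else acc2)
        (PySem.Set.ofList (kv.2.filter (fun p => !PySem.Str.isIn "@" p)), memo)).1 ↔
        pvV al (pvVals al kv.1) b := by
      intro b
      rw [hr.2.1 b, hstart b, hvals]
      constructor
      · rintro (⟨hb, hbase⟩ | ⟨m, hm, _, hrch⟩)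
        · exact ⟨b, hb, pvRch.base b hbase⟩
        · exact ⟨m, hm, hrch⟩
      · rintro ⟨m, hm, hrch⟩
        by_cases hmal : PySem.Str.isIn "@" m = true
        · exact Or.inr ⟨m, hm, hmal, hrch⟩
        · have hmb : PySem.Str.isIn "@" m = false := by simpa using hmal
          have := pv_rch_base_eq hrch hmb
          subst this
          exact Or.inl ⟨hm, hmb⟩
    have hfreshkv : res.contains kv.1 = false := hfresh kv (by simp)
    have hpair : (let start := PySem.Set.ofList (kv.2.filter (fun p => !PySem.Str.isIn "@" p))
          let r := kv.2.foldl
            (fun (acc2 : List String × PySem.Dict String (List String)) p =>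
              if PySem.Str.isIn "@" p then
                let e := pvExpandAlt (PySem.Dict.ofList al) (al.length + 1) acc2.2 p
                (PySem.Set.union acc2.1 e.1, e.2)
              else acc2)
            (start, (res, memo).2)
          ((res, memo).1.insert kv.1 r.1, r.2))
        = (res.insert kv.1 (kv.2.foldl
        (fun (acc2 : List String × PySem.Dict String (List String)) p =>
          if PySem.Str.isIn "@" p then
            let e := pvExpandAlt (PySem.Dict.ofList al) (al.length + 1) acc2.2 p
            (PySem.Set.union acc2.1 e.1, e.2)
          else acc2)
        (PySem.Set.ofList (kv.2.filter (fun p => !PySem.Str.isIn "@" p)), memo)).1, (kv.2.foldl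
        (fun (acc2 : List String × PySem.Dict String (List String)) p =>
          if PySem.Str.isIn "@" p then
            let e := pvExpandAlt (PySem.Dict.ofList al) (al.length + 1) acc2.2 p
            (PySem.Set.union acc2.1 e.1, e.2)
          else acc2)
        (PySem.Set.ofList (kv.2.filter (fun p => !PySem.Str.isIn "@" p)), memo)).2) := rfl
    rw [hpair]
    have hres := ihl (res.insert kv.1 (kv.2.foldl
        (fun (acc2 : List String × PySem.Dict String (List String)) p =>
          if PySem.Str.isIn "@" p then
            let e := pvExpandAlt (PySem.Dict.ofList al) (al.length + 1) acc2.2 p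
            (PySem.Set.union acc2.1 e.1, e.2)
          else acc2)
        (PySem.Set.ofList (kv.2.filter (fun p => !PySem.Str.isIn "@" p)), memo)).1) ((kv.2.foldl
        (fun (acc2 : List String × PySem.Dict String (List String)) p =>
          if PySem.Str.isIn "@" p then
            let e := pvExpandAlt (PySem.Dict.ofList al) (al.length + 1) acc2.2 p
            (PySem.Set.union acc2.1 e.1, e.2)
          else acc2)
        (PySem.Set.ofList (kv.2.filter (fun p => !PySem.Str.isIn "@" p)), memo)).2)
      (fun kv' hkv' => hsub kv' (by simp [hkv']))
      (by rw [List.map_cons, List.nodup_cons] at hnd; exact hnd.2)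
      (by
        intro kv' hkv'
        rw [PySem.Dict.contains_insert]
        have hne : kv'.1 ≠ kv.1 := by
          rw [List.map_cons, List.nodup_cons] at hnd
          intro he
          exact hnd.1 (he ▸ List.mem_map_of_mem hkv')
        simp [hne, hfresh kv' (by simp [hkv'])])
      hr.2.2
    refine ⟨?_, ?_⟩
    · rw [hres.1, PySem.Dict.items_insert_of_not_contains _ _ hfreshkv]
      simp
    · intro kv' hkv'
      rcases hres.2 kv' hkv' with hold | hgood
      · rw [PySem.Dict.items_insert_of_not_contains _ _ hfreshkv] at hold
        rcases List.mem_append.mp hold with h | h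
        · exact Or.inl h
        · rcases List.mem_singleton.mp h with rfl
          exact Or.inr ⟨hr.1, hentry⟩
      · exact Or.inr hgood

-- ===== VERDICT (by name: the statement is the Claim_ definition above) =====
theorem resolve_aliases_spec : Claim_equal_resolve_aliases := by
  intro al _ hpre
  obtain ⟨hk, hvnd, hcl, hac⟩ := hpre
  unfold Spec_resolve_aliases resolve_aliases resolve_aliases_alt
  -- A's side
  have hA := pv_go_spec al hk al.length (al.length + 2) (PySem.Dict.ofList al)
    (by omega)
    (by rw [pv_items_ofList al hk])
    (by
      rw [pv_items_ofList al hk]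
      intro kv hkv
      have hvals : pvVals al kv.1 = kv.2 := pv_getD_entry hk hkv
      refine ⟨⟨hvnd kv hkv, ?_⟩, by rw [hvals]; intro b; exact Iff.rfl⟩
      intro x hx hxal
      have hxk : x ∈ al.map Prod.fst := hcl kv hkv x hx hxal
      refine ⟨hxk, pv_mu_le al hk hcl hxk, ?_⟩
      intro hkval
      have hxsucc : x ∈ pvSucc al kv.1 := by
        unfold pvSucc
        rw [hvals]
        exact List.mem_filter.mpr ⟨hx, by simpa using hxal⟩
      exact pv_mu_lt al hk hcl hac (List.mem_map_of_mem hkv) hxsucc)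
  -- B's side
  have hB := pv_b_fold al hk hcl hac al PySem.Dict.empty PySem.Dict.empty
    (fun kv hkv => hkv) hk
    (by intro kv _; simp [PySem.Dict.contains_empty])
    (by intro p hp; simp [PySem.Dict.empty] at hp)
  rw [pv_items_ofList al hk] at *
  -- align the two item lists pointwise
  set Ai := (pvResolveGo (al.length + 2) (PySem.Dict.ofList al)).items with hAi
  set Bi := (al.foldl
    (fun (acc : PySem.Dict String (List String) × PySem.Dict String (List String)) kv =>
      let start := PySem.Set.ofList (kv.2.filter (fun p => !PySem.Str.isIn "@" p))
      let r := kv.2.foldl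
        (fun (acc2 : List String × PySem.Dict String (List String)) p =>
          if PySem.Str.isIn "@" p then
            let e := pvExpandAlt (PySem.Dict.ofList al) (al.length + 1) acc2.2 p
            (PySem.Set.union acc2.1 e.1, e.2)
          else acc2) (start, acc.2)
      (acc.1.insert kv.1 r.1, r.2)) (PySem.Dict.empty, PySem.Dict.empty)).1.items with hBi
  have hBkeys : Bi.map Prod.fst = al.map Prod.fst := by
    rw [hB.1]; simp [PySem.Dict.empty]
  have hBprops : ∀ kv ∈ Bi, kv.2.Nodup ∧ ∀ b, b ∈ kv.2 ↔ pvV al (pvVals al kv.1) b := by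
    intro kv hkv
    rcases hB.2 kv hkv with h | h
    · simp [PySem.Dict.empty] at h
    · exact h
  have hlen : Ai.length = Bi.length := by
    have h1 : Ai.length = (al.map Prod.fst).length := by
      rw [← hA.1]; simp
    have h2 : Bi.length = (al.map Prod.fst).length := by
      rw [← hBkeys]; simp
    omega
  apply List.ext_getElem (by simpa using hlen)
  intro i h1 h2
  simp only [List.getElem_map]
  have hAim : Ai[i]'(by simpa using h1) ∈ Ai := List.getElem_mem _
  have hBim : Bi[i]'(by simpa using h2) ∈ Bi := List.getElem_mem _
  have hmapeq : Ai.map Prod.fst = Bi.map Prod.fst := by rw [hA.1, hBkeys]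
  have hkeyeq : (Ai[i]'(by simpa using h1)).1 = (Bi[i]'(by simpa using h2)).1 := by
    have := List.getElem_of_eq hmapeq (i := i) (by simpa using h1)
    simpa using this
  have hAkv := hA.2 _ hAim
  have hBkv := hBprops _ hBim
  refine Prod.ext hkeyeq ?_
  show pvCanon (Ai[i]'(by simpa using h1)).2 = pvCanon (Bi[i]'(by simpa using h2)).2
  unfold pvCanon
  rw [PySem.List.sorted_id_eq_sorted_id_iff_perm]
  rw [List.perm_ext_iff_of_nodup hAkv.1 hBkv.1]
  intro b
  rw [hAkv.2 b, hBkv.2 b, hkeyeq]
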